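-- pv_equiv track=rewrite | github.com/yxlijun/vision-piano-amt | tools/helper.py | near_white
-- ===== SOURCE A (Python) =====
-- def near_white(white_loc,boxes):
--     index_list = []
--     if len(boxes)==0:
--         return index_list
--     for box in boxes:
--         min_loc = box[0][0]
--         max_loc = box[1][0]
--         diffs1,diffs2 = [],[]
--         for w_loc in white_loc:
--             diff1 = abs(min_loc-w_loc)
--             diff2 = abs(max_loc-w_loc)
--             diffs1.append(diff1)
--             diffs2.append(diff2)
--         '''
--         left_index,right_index = 0,0
--         for i,w_loc in enumerate(white_loc):
--             if i == len(white_loc)-1: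
--                 break
--             if white_loc[i]<=min_loc and white_loc[i+1]>=min_loc:
--                 left_index = i
--             if white_loc[i]<=max_loc and white_loc[i+1]>=max_loc:
--                 right_index = i
--         '''
--         left_index = diffs1.index(min(diffs1))-1
--         right_index = diffs2.index(min(diffs2))+1
--         index_list.append((left_index,right_index))
--     return index_list
-- ===== SOURCE B (Python) =====
-- def _first_argmin(white_loc, target):
--     # single streaming pass: index of the first w minimising abs(target - w)
--     best_i, best_d = 0, None
--     for i, w in enumerate(white_loc):
--         d = abs(target - w)
--         if best_d is None or d < best_d:
--             best_i, best_d = i, d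
--     return best_i
--
-- def near_white(white_loc, boxes):
--     return [(_first_argmin(white_loc, box[0][0]) - 1,
--              _first_argmin(white_loc, box[1][0]) + 1) for box in boxes]
-- ===== Notes on version B (the rewrite author's own statement) =====
-- stated objective: simpler
-- what changed: per box, A materialises two diff lists and then scans them twice more with min() and .index(); B computes the first-argmin index in a single streaming pass with no intermediate lists
-- outside the precondition, e.g. on near_white([], [[[1], [2]]]): A raises ValueError, B returns [(-1, 1)]; on near_white([3], [[[1]]]): A raises IndexError, B raises IndexError
import Mathlib
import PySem

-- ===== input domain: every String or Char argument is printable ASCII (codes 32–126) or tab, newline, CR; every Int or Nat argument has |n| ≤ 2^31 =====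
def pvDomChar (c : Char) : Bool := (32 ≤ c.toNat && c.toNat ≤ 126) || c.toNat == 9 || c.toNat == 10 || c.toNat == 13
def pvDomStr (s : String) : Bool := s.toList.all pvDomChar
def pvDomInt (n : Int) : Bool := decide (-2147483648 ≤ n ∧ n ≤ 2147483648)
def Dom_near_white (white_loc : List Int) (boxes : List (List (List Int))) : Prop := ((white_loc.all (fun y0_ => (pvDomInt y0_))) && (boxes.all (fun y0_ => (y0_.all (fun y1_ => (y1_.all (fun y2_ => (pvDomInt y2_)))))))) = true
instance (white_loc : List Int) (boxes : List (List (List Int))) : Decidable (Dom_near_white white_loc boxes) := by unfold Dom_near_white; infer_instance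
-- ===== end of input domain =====

-- B replaces A's three passes per box (build two diff lists, min(), .index()) with one
-- streaming first-argmin pass and no intermediate lists; same results on Pre_.

-- ===== PORT A =====
def near_white (white_loc : List Int) (boxes : List (List (List Int))) : List (Int × Int) :=
  if boxes.length == 0 then []
  else
    boxes.foldl (fun index_list box =>
      let min_loc : Int := (((PySem.List.pyGet? box 0).bind (fun r => PySem.List.pyGet? r 0)).getD 0)
      let max_loc : Int := (((PySem.List.pyGet? box 1).bind (fun r => PySem.List.pyGet? r 0)).getD 0)
      let diffs := white_loc.foldl
        (fun (p : List Int × List Int) w_loc => (p.1 ++ [|min_loc - w_loc|], p.2 ++ [|max_loc - w_loc|]))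
        ([], [])
      let left_index : Int :=
        (((PySem.List.min? diffs.1 (fun x => x)).bind (fun m => PySem.List.index? diffs.1 m)).map (fun n => (n : Int))).getD 0 - 1
      let right_index : Int :=
        (((PySem.List.min? diffs.2 (fun x => x)).bind (fun m => PySem.List.index? diffs.2 m)).map (fun n => (n : Int))).getD 0 + 1
      index_list ++ [(left_index, right_index)]) []

-- ===== PORT B =====
-- Source B's _first_argmin: one pass, state (best_i, best_d), strict improvement only
def nwFirstArgmin (target : Int) : List Int → Nat → Nat → Option Int → Nat
  | [], _, best_i, _ => best_i
  | w :: ws, i, best_i, best_d =>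
    let d := |target - w|
    match best_d with
    | none => nwFirstArgmin target ws (i + 1) i (some d)
    | some b =>
      if d < b then nwFirstArgmin target ws (i + 1) i (some d)
      else nwFirstArgmin target ws (i + 1) best_i (some b)

def near_white_alt (white_loc : List Int) (boxes : List (List (List Int))) : List (Int × Int) :=
  boxes.map (fun box =>
    ((nwFirstArgmin (((PySem.List.pyGet? box 0).bind (fun r => PySem.List.pyGet? r 0)).getD 0) white_loc 0 0 none : Int) - 1,
     (nwFirstArgmin (((PySem.List.pyGet? box 1).bind (fun r => PySem.List.pyGet? r 0)).getD 0) white_loc 0 0 none : Int) + 1))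

-- ===== PRECONDITION & SPEC =====
-- Pre_ excludes exactly the inputs where A raises: empty white_loc with non-empty boxes
-- (ValueError from min([])) and boxes lacking two non-empty rows (IndexError).
def Pre_near_white (white_loc : List Int) (boxes : List (List (List Int))) : Prop :=
  boxes = [] ∨ (white_loc ≠ [] ∧
    ∀ box ∈ boxes, 2 ≤ box.length ∧ box.getD 0 [] ≠ [] ∧ box.getD 1 [] ≠ [])
instance (white_loc : List Int) (boxes : List (List (List Int))) : Decidable (Pre_near_white white_loc boxes) := by unfold Pre_near_white; infer_instance

def pvWitness_near_white : List Int × List (List (List Int)) := ([0, 5, 9], [[[1], [6]]])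

def Spec_near_white (white_loc : List Int) (boxes : List (List (List Int))) (out : List (Int × Int)) : Prop := out = near_white_alt white_loc boxes
instance (white_loc : List Int) (boxes : List (List (List Int))) (out : List (Int × Int)) : Decidable (Spec_near_white white_loc boxes out) := by unfold Spec_near_white; infer_instance

-- ===== CLAIM (what is proved, stated in full; the proofs are below) =====
def Claim_equal_near_white : Prop := ∀ (white_loc : List Int) (boxes : List (List (List Int))), Dom_near_white white_loc boxes → Pre_near_white white_loc boxes → Spec_near_white white_loc boxes (near_white white_loc boxes)
-- ===== LEMMAS AND PROOFS =====

-- index of the first occurrence of the minimum (proof-side reference)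
def nwFam : List Int → Nat
  | [] => 0
  | d :: ds => if ds.all (fun y => decide (d ≤ y)) then 0 else nwFam ds + 1

-- "k is the first argmin of ds"
def nwIsFam (ds : List Int) (k : Nat) : Prop :=
  ∃ h : k < ds.length, (∀ y ∈ ds, ds[k] ≤ y) ∧ (∀ j (hj : j < k), ds[k] < ds[j]'(Nat.lt_trans hj h))

lemma nwIsFam_unique {ds : List Int} {k₁ k₂ : Nat} (h₁ : nwIsFam ds k₁) (h₂ : nwIsFam ds k₂) : k₁ = k₂ := by
  obtain ⟨hl₁, hmin₁, hfst₁⟩ := h₁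
  obtain ⟨hl₂, hmin₂, hfst₂⟩ := h₂
  rcases Nat.lt_trichotomy k₁ k₂ with h | h | h
  · have := hfst₂ k₁ h
    have := hmin₁ ds[k₂] (ds.getElem_mem hl₂)
    omega
  · exact h
  · have := hfst₁ k₂ h
    have := hmin₂ ds[k₁] (ds.getElem_mem hl₁)
    omega

lemma nwFam_isFam : ∀ ds : List Int, ds ≠ [] → nwIsFam ds (nwFam ds) := by
  intro ds
  induction ds with
  | nil => intro h; exact absurd rfl h
  | cons d ds ih =>
    intro _
    by_cases hall : ds.all (fun y => decide (d ≤ y))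
    · refine ⟨by simp [nwFam, hall], ?_, ?_⟩
      · intro y hy
        simp only [nwFam, hall, if_true, List.getElem_cons_zero]
        rcases List.mem_cons.mp hy with rfl | hy'
        · exact le_refl y
        · exact of_decide_eq_true (List.all_eq_true.mp hall y hy')
      · intro j hj
        simp [nwFam, hall] at hj
    · have hne : ds ≠ [] := by
        rintro rfl; simp at hall
      obtain ⟨hl, hmin, hfst⟩ := ih hne
      have hstep : nwFam (d :: ds) = nwFam ds + 1 := by simp [nwFam, hall]
      refine ⟨by simp [hstep]; omega, ?_, ?_⟩
      · intro y hy
        have hgl : (d :: ds)[nwFam (d :: ds)]'(by simp [hstep]; omega) = ds[nwFam ds] := by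
          simp [hstep]
        rw [hgl]
        rcases List.mem_cons.mp hy with rfl | hy'
        · -- some element of ds is < d, and ds[nwFam ds] ≤ it
          simp only [List.all_eq_true, decide_eq_true_eq] at hall
          push Not at hall
          obtain ⟨z, hz, hzd⟩ := hall
          have := hmin z hz
          omega
        · exact hmin y hy'
      · intro j hj
        have hgl : (d :: ds)[nwFam (d :: ds)]'(by simp [hstep]; omega) = ds[nwFam ds] := by
          simp [hstep]
        rw [hgl]
        rw [hstep] at hj
        match j, hj with
        | 0, _ =>
          simp only [List.getElem_cons_zero]
          simp only [List.all_eq_true, decide_eq_true_eq] at hall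
          push Not at hall
          obtain ⟨z, hz, hzd⟩ := hall
          have := hmin z hz
          omega
        | j + 1, hj =>
          have hj' : j < nwFam ds := by omega
          have := hfst j hj'
          simpa using this

-- A's min()+.index() pair computes the first argmin
lemma nwAidx_isFam (ds : List Int) (h : ds ≠ []) :
    ∃ k, ((PySem.List.min? ds (fun x => x)).bind (fun m => PySem.List.index? ds m)) = some k ∧ nwIsFam ds k := by
  cases hm : PySem.List.min? ds (fun x => x) with
  | none =>
    rw [PySem.List.min?_eq_none_iff] at hm
    exact absurd hm h
  | some m =>
  have hmem : m ∈ ds := PySem.List.min?_mem hm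
  have hle : ∀ y ∈ ds, m ≤ y := fun y hy => PySem.List.min?_isMin hm y hy
  have hsome : (PySem.List.index? ds m).isSome = true := (PySem.List.index?_isSome_iff ds m).mpr hmem
  cases hk : PySem.List.index? ds m with
  | none => rw [hk] at hsome; simp at hsome
  | some k =>
  obtain ⟨hkl, hval, hne⟩ := PySem.List.getElem_of_index?_eq_some hk
  refine ⟨k, by exact hk, hkl, ?_, ?_⟩
  · intro y hy; rw [hval]; exact hle y hy
  · intro j hj
    rw [hval]
    have h1 := hle (ds[j]'(Nat.lt_trans hj hkl)) (ds.getElem_mem _)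
    have h2 := hne j hj
    omega

-- B's scan, running state characterised
lemma nw_run (t : Int) : ∀ (ws : List Int) (b : Int) (i bi : Nat),
    nwFirstArgmin t ws i bi (some b) =
      if (ws.map (fun w => |t - w|)).any (fun y => decide (y < b))
      then i + nwFam (ws.map (fun w => |t - w|)) else bi := by
  intro ws
  induction ws with
  | nil => intro b i bi; simp [nwFirstArgmin]
  | cons w ws ih =>
    intro b i bi
    simp only [nwFirstArgmin, List.map_cons, List.any_cons]
    by_cases hd : |t - w| < b
    · rw [if_pos hd, ih]
      by_cases hall : (ws.map (fun w => |t - w|)).all (fun y => decide (|t - w| ≤ y))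
      · have hany : (ws.map (fun w' => |t - w'|)).any (fun y => decide (y < |t - w|)) = false := by
          simp only [List.all_eq_true, decide_eq_true_eq] at hall
          simp only [List.any_eq_false, decide_eq_true_eq]
          intro y hy; have := hall y hy; omega
        rw [hany, if_neg (by simp)]
        simp [hd, nwFam, hall]
      · have hany : (ws.map (fun w' => |t - w'|)).any (fun y => decide (y < |t - w|)) = true := by
          simp only [List.all_eq_true, decide_eq_true_eq] at hall
          push Not at hall
          obtain ⟨z, hz, hzd⟩ := hall
          simp only [List.any_eq_true, decide_eq_true_eq]
          exact ⟨z, hz, by omega⟩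
        rw [hany, if_pos (by simp)]
        simp only [hd, decide_true, Bool.true_or, if_true]
        simp [nwFam, hall]
        omega
    · rw [if_neg hd, ih]
      by_cases htail : (ws.map (fun w' => |t - w'|)).any (fun y => decide (y < b))
      · rw [if_pos htail, if_pos (by simp [htail])]
        have hall : ¬ (ws.map (fun w' => |t - w'|)).all (fun y => decide (|t - w| ≤ y)) := by
          simp only [List.any_eq_true, decide_eq_true_eq] at htail
          obtain ⟨z, hz, hzb⟩ := htail
          simp only [List.all_eq_true, decide_eq_true_eq]
          push Not
          exact ⟨z, hz, by omega⟩
        simp [nwFam, hall]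
        omega
      · rw [if_neg htail, if_neg (by simp [htail]; omega)]

-- B's scan from the initial None state computes the first argmin
lemma nwFirstArgmin_eq_fam (t : Int) (ws : List Int) (h : ws ≠ []) :
    nwFirstArgmin t ws 0 0 none = nwFam (ws.map (fun w => |t - w|)) := by
  match ws, h with
  | w :: ws, _ =>
    show nwFirstArgmin t ws 1 0 (some |t - w|) = _
    rw [nw_run]
    by_cases hall : (ws.map (fun w' => |t - w'|)).all (fun y => decide (|t - w| ≤ y))
    · have hany : (ws.map (fun w' => |t - w'|)).any (fun y => decide (y < |t - w|)) = false := by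
        simp only [List.all_eq_true, decide_eq_true_eq] at hall
        simp only [List.any_eq_false, decide_eq_true_eq]
        intro y hy; have := hall y hy; omega
      rw [hany]
      simp [nwFam, hall]
    · have hany : (ws.map (fun w' => |t - w'|)).any (fun y => decide (y < |t - w|)) = true := by
        simp only [List.all_eq_true, decide_eq_true_eq] at hall
        push Not at hall
        obtain ⟨z, hz, hzd⟩ := hall
        simp only [List.any_eq_true, decide_eq_true_eq]
        exact ⟨z, hz, by omega⟩
      rw [hany]
      simp [nwFam, hall]
      omega

-- A's per-target index expression equals B's scan result (non-empty white_loc)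
lemma nw_target_eq (t : Int) (wl : List Int) (h : wl ≠ []) :
    let ds := wl.map (fun w => |t - w|)
    (((PySem.List.min? ds (fun x => x)).bind (fun m => PySem.List.index? ds m)).map (fun n => (n : Int))).getD 0
      = (nwFirstArgmin t wl 0 0 none : Int) := by
  intro ds
  have hds : ds ≠ [] := by simpa [ds] using h
  obtain ⟨k, hk, hfam⟩ := nwAidx_isFam ds hds
  rw [hk]
  have h1 : k = nwFam ds := nwIsFam_unique hfam (nwFam_isFam ds hds)
  rw [nwFirstArgmin_eq_fam t wl h]
  simp [h1, ds]

-- ===== VERDICT (by name: the statement is the Claim_ definition above) =====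
theorem near_white_spec : Claim_equal_near_white := by
  intro white_loc boxes _ hpre
  unfold Spec_near_white
  rcases hpre with rfl | ⟨hwl, hbox⟩
  · simp [near_white, near_white_alt]
  · by_cases hb : boxes = []
    · simp [hb, near_white, near_white_alt]
    · unfold near_white near_white_alt
      rw [if_neg (by simpa using hb)]
      rw [PySem.List.foldl_append_singleton_eq_map]
      simp only [List.nil_append]
      apply List.map_congr_left
      intro box hmem
      dsimp only
      set t1 := ((PySem.List.pyGet? box 0).bind (fun r => PySem.List.pyGet? r 0)).getD 0 with ht1
      set t2 := ((PySem.List.pyGet? box 1).bind (fun r => PySem.List.pyGet? r 0)).getD 0 with ht2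
      rw [PySem.List.foldl_prod_mk (f := fun acc w => acc ++ [|t1 - w|]) (g := fun acc w => acc ++ [|t2 - w|])]
      rw [PySem.List.foldl_append_singleton_eq_map, PySem.List.foldl_append_singleton_eq_map]
      simp only [List.nil_append]
      have e1 := nw_target_eq t1 white_loc hwl
      have e2 := nw_target_eq t2 white_loc hwl
      simp only at e1 e2
      rw [e1, e2]
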